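-- pv_equiv track=rewrite | github.com/gandusgui/dftbpy | src/dftbpy/param/slako.py | select_integrals
-- ===== SOURCE A (Python) =====
-- slako_integrals = ["dds", "ddp", "ddd", "pds", "pdp", "pps", "ppp", "sds", "sps", "sss"]
--
-- def select_integrals(nlf1_j, nlf2_j):
--     selected = []
--     for ski, (l1, l2, itype) in enumerate(slako_integrals):
--         s1_j = []
--         for nlf in nlf1_j:
--             if l1 == nlf[1]:
--                 s1_j.append(nlf)
--         if len(s1_j) == 0:
--             continue
--         s2_j = []
--         for nlf in nlf2_j:
--             if l2 == nlf[1]: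
--                 s2_j.append(nlf)
--         if len(s2_j) == 0:
--             continue
--         for nl1 in s1_j:
--             for nl2 in s2_j:
--                 selected.append((ski, nl1, nl2))
--     return selected
-- ===== SOURCE B (Python) =====
-- slako_integrals = ["dds", "ddp", "ddd", "pds", "pdp", "pps", "ppp", "sds", "sps", "sss"]
--
-- def select_integrals(nlf1_j, nlf2_j):
--     # One indexing pass per input list, then O(1) lookups per integral.
--     group1 = {}
--     for nlf in nlf1_j:
--         group1.setdefault(nlf[1], []).append(nlf)
--     group2 = {}
--     for nlf in nlf2_j:
--         group2.setdefault(nlf[1], []).append(nlf)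
--     selected = []
--     for ski, (l1, l2, itype) in enumerate(slako_integrals):
--         s1 = group1.get(l1, [])
--         s2 = group2.get(l2, [])
--         if s1 and s2:
--             for nl1 in s1:
--                 for nl2 in s2:
--                     selected.append((ski, nl1, nl2))
--     return selected
-- ===== Notes on version B (the rewrite author's own statement) =====
-- stated objective: alternative
-- what changed: B replaces A's per-integral rescans of both input lists (10 filter passes each) by a single grouping pass per list building a dict keyed on nlf[1], then emits each integral's product from two dict lookups.
-- outside the precondition, e.g. on select_integrals(['xx'], ['']): A returns [], B raises IndexError
import Mathlib
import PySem

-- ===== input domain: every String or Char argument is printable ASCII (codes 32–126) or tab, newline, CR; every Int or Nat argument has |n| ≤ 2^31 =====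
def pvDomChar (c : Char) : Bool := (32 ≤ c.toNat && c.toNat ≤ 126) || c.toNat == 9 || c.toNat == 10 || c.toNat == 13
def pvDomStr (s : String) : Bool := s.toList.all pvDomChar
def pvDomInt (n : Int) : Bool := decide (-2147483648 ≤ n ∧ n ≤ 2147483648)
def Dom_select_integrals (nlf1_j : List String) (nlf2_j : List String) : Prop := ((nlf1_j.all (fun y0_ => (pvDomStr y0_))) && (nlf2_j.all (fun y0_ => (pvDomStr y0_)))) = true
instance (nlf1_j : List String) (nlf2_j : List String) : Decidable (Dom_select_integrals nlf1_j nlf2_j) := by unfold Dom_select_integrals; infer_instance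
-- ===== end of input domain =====

-- B builds a dict index nlf[1] -> matching strings in one pass per list and emits each
-- integral's product from two lookups, instead of A's per-integral filtering rescans
-- (objective: alternative algorithm of similar cost; equivalence of RETURN values on Pre_).

-- ===== PORT A =====
def slako_integrals : List String :=
  ["dds", "ddp", "ddd", "pds", "pdp", "pps", "ppp", "sds", "sps", "sss"]

-- body of A's outer loop (`for ski, (l1, l2, itype) in enumerate(slako_integrals)`)
def selA_body (nlf1_j : List String) (nlf2_j : List String)
    (selected : List (Int × String × String)) (p : Int × String) :
    List (Int × String × String) :=
  let l1 := (PySem.Str.pyGet? p.2 0).getD ' '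
  let l2 := (PySem.Str.pyGet? p.2 1).getD ' '
  let s1_j := nlf1_j.foldl
    (fun acc nlf => if some l1 == PySem.Str.pyGet? nlf 1 then acc ++ [nlf] else acc) []
  if s1_j.length = 0 then selected
  else
    let s2_j := nlf2_j.foldl
      (fun acc nlf => if some l2 == PySem.Str.pyGet? nlf 1 then acc ++ [nlf] else acc) []
    if s2_j.length = 0 then selected
    else s1_j.foldl
      (fun sel nl1 => s2_j.foldl (fun sel2 nl2 => sel2 ++ [(p.1, nl1, nl2)]) sel) selected

def select_integrals (nlf1_j : List String) (nlf2_j : List String) :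
    List (Int × String × String) :=
  (PySem.List.enumerate slako_integrals).foldl (selA_body nlf1_j nlf2_j) []

-- ===== PORT B =====
-- `group.setdefault(nlf[1], []).append(nlf)` loop
def groupBy2nd (xs : List String) : PySem.Dict Char (List String) :=
  xs.foldl (fun d nlf => d.modify ((PySem.Str.pyGet? nlf 1).getD ' ') [] (· ++ [nlf]))
    PySem.Dict.empty

-- body of B's emission loop over enumerate(slako_integrals)
def selB_body (g1 g2 : PySem.Dict Char (List String))
    (selected : List (Int × String × String)) (p : Int × String) :
    List (Int × String × String) :=
  let s1 := g1.getD ((PySem.Str.pyGet? p.2 0).getD ' ') []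
  let s2 := g2.getD ((PySem.Str.pyGet? p.2 1).getD ' ') []
  if s1 ≠ [] ∧ s2 ≠ [] then
    selected ++ s1.flatMap (fun nl1 => s2.map (fun nl2 => (p.1, nl1, nl2)))
  else selected

def select_integrals_alt (nlf1_j : List String) (nlf2_j : List String) :
    List (Int × String × String) :=
  let g1 := groupBy2nd nlf1_j
  let g2 := groupBy2nd nlf2_j
  (PySem.List.enumerate slako_integrals).foldl (selB_body g1 g2) []

-- ===== PRECONDITION & SPEC =====
-- Pre_ requires every string in both lists to have length ≥ 2: both Pythons index nlf[1],
-- so A raises IndexError on any short string it scans and B raises on any short string in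
-- either list; Pre_ also excludes inputs where A returns [] without ever scanning nlf2_j
-- (no string of nlf1_j has second char 'd','p' or 's') while B's index pass would raise there.
def Pre_select_integrals (nlf1_j : List String) (nlf2_j : List String) : Prop :=
  (∀ s ∈ nlf1_j, 2 ≤ s.toList.length) ∧ (∀ s ∈ nlf2_j, 2 ≤ s.toList.length)
instance (nlf1_j : List String) (nlf2_j : List String) :
    Decidable (Pre_select_integrals nlf1_j nlf2_j) := by
  unfold Pre_select_integrals; infer_instance

def pvWitness_select_integrals : List String × List String := (["3d", "2p"], ["4p", "1s"])

def Spec_select_integrals (nlf1_j : List String) (nlf2_j : List String)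
    (out : List (Int × String × String)) : Prop := out = select_integrals_alt nlf1_j nlf2_j
instance (nlf1_j : List String) (nlf2_j : List String) (out : List (Int × String × String)) :
    Decidable (Spec_select_integrals nlf1_j nlf2_j out) := by
  unfold Spec_select_integrals; infer_instance

-- ===== CLAIM (what is proved, stated in full; the proofs are below) =====
def Claim_equal_select_integrals : Prop := ∀ (nlf1_j : List String) (nlf2_j : List String), Dom_select_integrals nlf1_j nlf2_j → Pre_select_integrals nlf1_j nlf2_j → Spec_select_integrals nlf1_j nlf2_j (select_integrals nlf1_j nlf2_j)

-- ===== LEMMAS AND PROOFS =====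

-- grouping fold characterised: lookup in the built dict is a filter of the input
theorem grp_aux (key : String → Char) (xs : List String)
    (d : PySem.Dict Char (List String)) (c : Char) :
    (xs.foldl (fun d nlf => d.modify (key nlf) [] (· ++ [nlf])) d).getD c [] =
      d.getD c [] ++ xs.filter (fun nlf => key nlf == c) := by
  induction xs generalizing d with
  | nil => simp
  | cons x xs ih =>
    simp only [List.foldl_cons, ih, List.filter_cons]
    rw [PySem.Dict.getD_modify]
    by_cases hk : c = key x
    · simp [hk, List.append_assoc]
    · have hb : (key x == c) = false := by
        simp only [beq_eq_false_iff_ne, ne_eq]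
        exact fun e => hk e.symm
      simp [hk, hb]

-- B's group lookup is A's filter (for lists of length-≥2 strings).
theorem groupBy2nd_getD (xs : List String) (c : Char)
    (h : ∀ s ∈ xs, 2 ≤ s.toList.length) :
    (groupBy2nd xs).getD c [] =
      xs.filter (fun nlf => some c == PySem.Str.pyGet? nlf 1) := by
  unfold groupBy2nd
  rw [grp_aux (fun nlf => (PySem.Str.pyGet? nlf 1).getD ' ')]
  simp only [PySem.Dict.empty]
  rw [show (PySem.Dict.mk ([] : List (Char × List String))).getD c [] = [] from rfl,
    List.nil_append]
  apply List.filter_congr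
  intro nlf hm
  have h2 := h nlf hm
  obtain ⟨x, hx⟩ : ∃ x, PySem.List.pyGet? nlf.toList 1 = some x :=
    ⟨_, by simpa using PySem.List.pyGet?_ofNat nlf.toList 1 (by omega)⟩
  by_cases hcx : c = x
  · subst hcx; simp [PySem.Str.pyGet?, hx]
  · have hb1 : (x == c) = false := by simp [Ne.symm hcx]
    have hb2 : (some c == some x) = false := by simp [hcx]
    simp [PySem.Str.pyGet?, hx, hb1, hb2]

-- the two loop bodies agree pointwise
theorem body_eq (nlf1_j nlf2_j : List String)
    (h1 : ∀ s ∈ nlf1_j, 2 ≤ s.toList.length)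
    (h2 : ∀ s ∈ nlf2_j, 2 ≤ s.toList.length)
    (selected : List (Int × String × String)) (p : Int × String) :
    selA_body nlf1_j nlf2_j selected p =
      selB_body (groupBy2nd nlf1_j) (groupBy2nd nlf2_j) selected p := by
  unfold selA_body selB_body
  rw [groupBy2nd_getD nlf1_j _ h1, groupBy2nd_getD nlf2_j _ h2]
  simp only [PySem.List.foldl_append_if_eq_filter, List.nil_append]
  set s1 := nlf1_j.filter
    (fun nlf => some ((PySem.Str.pyGet? p.2 0).getD ' ') == PySem.Str.pyGet? nlf 1) with hs1
  set s2 := nlf2_j.filter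
    (fun nlf => some ((PySem.Str.pyGet? p.2 1).getD ' ') == PySem.Str.pyGet? nlf 1) with hs2
  by_cases e1 : s1 = []
  · simp [e1]
  · by_cases e2 : s2 = []
    · simp [e1, e2, List.length_eq_zero_iff]
    · rw [if_neg (by simp [List.length_eq_zero_iff, e1]),
        if_neg (by simp [List.length_eq_zero_iff, e2]), if_pos ⟨e1, e2⟩]
      simp only [PySem.List.foldl_append_singleton_eq_map]
      rw [PySem.List.foldl_append_eq_flatMap]

-- ===== VERDICT (by name: the statement is the Claim_ definition above) =====
theorem select_integrals_spec : Claim_equal_select_integrals := by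
  intro nlf1_j nlf2_j _dom pre
  unfold Spec_select_integrals select_integrals select_integrals_alt
  have hb : selA_body nlf1_j nlf2_j =
      selB_body (groupBy2nd nlf1_j) (groupBy2nd nlf2_j) :=
    funext fun acc => funext fun p => body_eq nlf1_j nlf2_j pre.1 pre.2 acc p
  rw [hb]
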